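-- pv_equiv track=rewrite | github.com/ilyamzy/IGI | IGI/LR3/tasks/task4.py | get_words_after_comma
-- ===== SOURCE A (Python) =====
-- def get_words_after_comma(text):
--     """Возвращает слова после запятых, в алфавитном порядке"""
--     parts = text.split(",")
--     words_after_comma = []
--
--     for part in parts[1:]:
--         word = ""
--         for char in part:
--             if char.isalpha() or char == '-':
--                 word += char
--             else:
--                 if word:
--                     break
--         if word:
--             words_after_comma.append(word)
--
--     return sorted(words_after_comma)
-- ===== SOURCE B (Python) =====
-- def _is_word_char(c):
--     return c.isalpha() or c == '-'
--
--
-- def _first_word(part):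
--     # two-phase index scan: skip leading non-word chars, then take the word run
--     i = 0
--     n = len(part)
--     while i < n and not _is_word_char(part[i]):
--         i += 1
--     j = i
--     while j < n and _is_word_char(part[j]):
--         j += 1
--     return part[i:j]
--
--
-- def get_words_after_comma(text):
--     words = [w for w in (_first_word(p) for p in text.split(",")[1:]) if w]
--     return sorted(words)
-- ===== Notes on version B (the rewrite author's own statement) =====
-- stated objective: simpler
-- what changed: Replaces A's char-by-char accumulator loop with break/leftover-state logic by a two-phase skip/take index scan that slices out the first word of each part, collected by a comprehension.
import Mathlib
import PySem

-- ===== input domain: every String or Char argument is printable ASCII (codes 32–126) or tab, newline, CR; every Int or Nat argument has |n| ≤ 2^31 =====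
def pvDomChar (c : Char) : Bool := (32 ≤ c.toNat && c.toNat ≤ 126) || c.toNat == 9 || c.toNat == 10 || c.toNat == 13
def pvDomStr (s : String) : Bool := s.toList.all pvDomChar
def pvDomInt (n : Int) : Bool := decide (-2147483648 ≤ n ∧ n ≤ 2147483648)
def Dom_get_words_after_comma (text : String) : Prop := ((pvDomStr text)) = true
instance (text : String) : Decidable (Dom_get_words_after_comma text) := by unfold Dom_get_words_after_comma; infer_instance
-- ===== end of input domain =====

-- B replaces A's accumulate-with-break inner loop by a two-phase skip/take scan; objective: simpler.

-- ===== PORT A =====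
-- the predicate `char.isalpha() or char == '-'`
def pvWordChar (c : Char) : Bool := PySem.Chars.isalpha c || c == '-'

-- A's inner `for char in part` loop, with its break-when-word-nonempty semantics
def pvInnerA : List Char → List Char → List Char
  | [], word => word
  | c :: cs, word =>
    if pvWordChar c then pvInnerA cs (word ++ [c])
    else if word ≠ [] then word else pvInnerA cs word

def get_words_after_comma (text : String) : List String :=
  let parts := PySem.Chars.splitOn text.toList [',']
  let words := (parts.drop 1).foldl (fun acc part =>
    let word := pvInnerA part []
    if word ≠ [] then acc ++ [String.ofList word] else acc) []
  PySem.List.sorted words (fun w => w)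

-- ===== PORT B =====
-- B's first while loop: advance past leading non-word chars
def pvSkipNonWord : List Char → List Char
  | [] => []
  | c :: cs => if pvWordChar c then c :: cs else pvSkipNonWord cs

-- B's second while loop: take the leading word-char run
def pvTakeWord : List Char → List Char
  | [] => []
  | c :: cs => if pvWordChar c then c :: pvTakeWord cs else []

def pvFirstWord (part : List Char) : List Char := pvTakeWord (pvSkipNonWord part)

def get_words_after_comma_alt (text : String) : List String :=
  let words := (((PySem.Chars.splitOn text.toList [',']).drop 1).map
      (fun p => String.ofList (pvFirstWord p))).filter (fun w => w ≠ "")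
  PySem.List.sorted words (fun w => w)

-- ===== PRECONDITION & SPEC =====
def Spec_get_words_after_comma (text : String) (out : List String) : Prop := out = get_words_after_comma_alt text
instance (text : String) (out : List String) : Decidable (Spec_get_words_after_comma text out) := by unfold Spec_get_words_after_comma; infer_instance

-- ===== CLAIM (what is proved, stated in full; the proofs are below) =====
def Claim_equal_get_words_after_comma : Prop := ∀ (text : String), Dom_get_words_after_comma text → Spec_get_words_after_comma text (get_words_after_comma text)

-- ===== LEMMAS AND PROOFS =====
theorem pvInnerA_ne_nil (cs : List Char) (w : List Char) (hw : w ≠ []) :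
    pvInnerA cs w = w ++ pvTakeWord cs := by
  induction cs generalizing w with
  | nil => simp [pvInnerA, pvTakeWord]
  | cons c cs ih =>
    by_cases hc : pvWordChar c = true
    · have : w ++ [c] ≠ [] := by simp
      simp [pvInnerA, pvTakeWord, hc, ih _ this]
    · simp [pvInnerA, pvTakeWord, hc, hw]

theorem pvInnerA_nil (cs : List Char) : pvInnerA cs [] = pvFirstWord cs := by
  induction cs with
  | nil => simp [pvInnerA, pvFirstWord, pvSkipNonWord, pvTakeWord]
  | cons c cs ih =>
    by_cases hc : pvWordChar c = true
    · simp [pvInnerA, pvFirstWord, pvSkipNonWord, pvTakeWord, hc,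
        pvInnerA_ne_nil cs [c] (by simp)]
    · simpa [pvInnerA, pvFirstWord, pvSkipNonWord, hc] using ih

theorem pv_foldl_eq (ps : List (List Char)) (acc : List String) :
    ps.foldl (fun acc part =>
      let word := pvInnerA part []
      if word ≠ [] then acc ++ [String.ofList word] else acc) acc
    = acc ++ (ps.map (fun p => String.ofList (pvFirstWord p))).filter (fun w => w ≠ "") := by
  induction ps generalizing acc with
  | nil => simp
  | cons p ps ih =>
    rw [List.foldl_cons, ih]
    by_cases hp : pvFirstWord p = []
    · simp [pvInnerA_nil, hp]
    · simp [pvInnerA_nil, hp]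

-- ===== VERDICT (by name: the statement is the Claim_ definition above) =====
theorem get_words_after_comma_spec : Claim_equal_get_words_after_comma := by
  intro text _
  unfold Spec_get_words_after_comma get_words_after_comma get_words_after_comma_alt
  simp only [pv_foldl_eq, List.nil_append]
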